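-- pv_equiv track=rewrite | github.com/maq1017/VersaTerm | software/tools/render_viewdata_font.py | slot_h_line_range
-- ===== SOURCE A (Python) =====
-- CHAR_HEIGHT   = 20
--
-- CHARS_PER_ROW = 32
--
-- BMP_ROWS      = 160
--
-- def slot_h_line_range(slot, data_start_line):
--     """Return (min_line, max_line) in the .h file for all scanlines of a slot."""
--     char_row = slot // CHARS_PER_ROW
--     byte_col = slot  % CHARS_PER_ROW
--     lines = []
--     for s in range(CHAR_HEIGHT):
--         br = (BMP_ROWS - 1) - char_row * CHAR_HEIGHT - s
--         lines.append(data_start_line + (br * CHARS_PER_ROW + byte_col) // 16)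
--     return min(lines), max(lines)
-- ===== SOURCE B (Python) =====
-- CHAR_HEIGHT   = 20
--
-- CHARS_PER_ROW = 32
--
-- BMP_ROWS      = 160
--
-- def slot_h_line_range(slot, data_start_line):
--     """Return (min_line, max_line) in the .h file for all scanlines of a slot.
--
--     The per-scanline value is monotone in the scanline index, so only the two
--     extreme scanlines (s = 0 and s = CHAR_HEIGHT-1) need to be evaluated."""
--     char_row = slot // CHARS_PER_ROW
--     byte_col = slot % CHARS_PER_ROW
--     br_hi = (BMP_ROWS - 1) - char_row * CHAR_HEIGHT
--     br_lo = br_hi - (CHAR_HEIGHT - 1)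
--     v_hi = data_start_line + (br_hi * CHARS_PER_ROW + byte_col) // 16
--     v_lo = data_start_line + (br_lo * CHARS_PER_ROW + byte_col) // 16
--     return min(v_lo, v_hi), max(v_lo, v_hi)
-- ===== Notes on version B (the rewrite author's own statement) =====
-- stated objective: simpler
-- what changed: The per-scanline line number is monotone in the scanline index, so B drops the 20-iteration loop, the list and the list-wide min/max, and evaluates the formula only at the two extreme scanlines (s = 0 and s = CHAR_HEIGHT-1).
import Mathlib
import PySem

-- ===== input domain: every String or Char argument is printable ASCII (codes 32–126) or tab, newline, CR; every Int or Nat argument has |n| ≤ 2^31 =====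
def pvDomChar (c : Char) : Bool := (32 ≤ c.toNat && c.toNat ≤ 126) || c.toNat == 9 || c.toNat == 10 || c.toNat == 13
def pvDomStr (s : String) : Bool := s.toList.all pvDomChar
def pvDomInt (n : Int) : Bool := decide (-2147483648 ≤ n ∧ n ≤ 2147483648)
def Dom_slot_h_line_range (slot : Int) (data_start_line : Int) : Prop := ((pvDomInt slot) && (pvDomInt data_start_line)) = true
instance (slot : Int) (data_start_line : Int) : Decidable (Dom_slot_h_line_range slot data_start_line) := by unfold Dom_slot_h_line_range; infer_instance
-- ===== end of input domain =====

-- B replaces A's 20-iteration scanline loop plus list min/max by evaluating the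
-- monotone per-scanline formula at the two extreme scanlines only (simpler; no loop, no list).

-- ===== PORT A =====
-- literal port of A: build the list of the 20 scanline line numbers, then min/max of the list.
-- `lines` always has 20 elements, so Python's min/max never raise; `.getD 0` is exact here.
def slot_h_line_range (slot : Int) (data_start_line : Int) : Int × Int :=
  let char_row := PySem.Int.floordiv slot 32
  let byte_col := PySem.Int.mod slot 32
  let lines := (PySem.List.pyRange 0 20 1).foldl (fun acc s =>
    let br := (160 - 1) - char_row * 20 - s
    acc ++ [data_start_line + PySem.Int.floordiv (br * 32 + byte_col) 16]) []
  ((PySem.List.min? lines (fun x => x)).getD 0, (PySem.List.max? lines (fun x => x)).getD 0)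

-- ===== PORT B =====
def slot_h_line_range_alt (slot : Int) (data_start_line : Int) : Int × Int :=
  let char_row := PySem.Int.floordiv slot 32
  let byte_col := PySem.Int.mod slot 32
  let br_hi := (160 - 1) - char_row * 20
  let br_lo := br_hi - (20 - 1)
  let v_hi := data_start_line + PySem.Int.floordiv (br_hi * 32 + byte_col) 16
  let v_lo := data_start_line + PySem.Int.floordiv (br_lo * 32 + byte_col) 16
  (min v_lo v_hi, max v_lo v_hi)

-- ===== PRECONDITION & SPEC =====
def Spec_slot_h_line_range (slot : Int) (data_start_line : Int) (out : Int × Int) : Prop := out = slot_h_line_range_alt slot data_start_line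
instance (slot : Int) (data_start_line : Int) (out : Int × Int) : Decidable (Spec_slot_h_line_range slot data_start_line out) := by unfold Spec_slot_h_line_range; infer_instance

-- ===== CLAIM (what is proved, stated in full; the proofs are below) =====
def Claim_equal_slot_h_line_range : Prop := ∀ (slot : Int) (data_start_line : Int), Dom_slot_h_line_range slot data_start_line → Spec_slot_h_line_range slot data_start_line (slot_h_line_range slot data_start_line)

-- ===== LEMMAS AND PROOFS =====
theorem rng20 : PySem.List.pyRange 0 20 1 = [0,1,2,3,4,5,6,7,8,9,10,11,12,13,14,15,16,17,18,19] := by decide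
theorem slot_h_line_range_eq (slot data_start_line : Int) :
    slot_h_line_range slot data_start_line = slot_h_line_range_alt slot data_start_line := by
  simp only [slot_h_line_range, slot_h_line_range_alt, rng20]
  generalize PySem.Int.floordiv slot 32 = c
  generalize PySem.Int.mod slot 32 = b
  simp only [List.foldl, List.cons_append, List.nil_append]
  rw [PySem.List.min?_id_cons, PySem.List.max?_id_cons]
  have key : ∀ k : Int, (k * 32 + b) / 16 = 2 * k + b / 16 := by intro k; omega
  simp only [List.foldl, Option.getD_some,
    PySem.Int.floordiv_eq_ediv_of_pos (show (0:Int) < 16 by norm_num), key]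
  rw [show min (data_start_line + (2 * (160 - 1 - c * 20 - 0) + b / 16)) (data_start_line + (2 * (160 - 1 - c * 20 - 1) + b / 16)) = (data_start_line + (2 * (160 - 1 - c * 20 - 1) + b / 16)) from min_eq_right (by omega)]
  rw [show max (data_start_line + (2 * (160 - 1 - c * 20 - 0) + b / 16)) (data_start_line + (2 * (160 - 1 - c * 20 - 1) + b / 16)) = (data_start_line + (2 * (160 - 1 - c * 20 - 0) + b / 16)) from max_eq_left (by omega)]
  rw [show min (data_start_line + (2 * (160 - 1 - c * 20 - 1) + b / 16)) (data_start_line + (2 * (160 - 1 - c * 20 - 2) + b / 16)) = (data_start_line + (2 * (160 - 1 - c * 20 - 2) + b / 16)) from min_eq_right (by omega)]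
  rw [show max (data_start_line + (2 * (160 - 1 - c * 20 - 0) + b / 16)) (data_start_line + (2 * (160 - 1 - c * 20 - 2) + b / 16)) = (data_start_line + (2 * (160 - 1 - c * 20 - 0) + b / 16)) from max_eq_left (by omega)]
  rw [show min (data_start_line + (2 * (160 - 1 - c * 20 - 2) + b / 16)) (data_start_line + (2 * (160 - 1 - c * 20 - 3) + b / 16)) = (data_start_line + (2 * (160 - 1 - c * 20 - 3) + b / 16)) from min_eq_right (by omega)]
  rw [show max (data_start_line + (2 * (160 - 1 - c * 20 - 0) + b / 16)) (data_start_line + (2 * (160 - 1 - c * 20 - 3) + b / 16)) = (data_start_line + (2 * (160 - 1 - c * 20 - 0) + b / 16)) from max_eq_left (by omega)]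
  rw [show min (data_start_line + (2 * (160 - 1 - c * 20 - 3) + b / 16)) (data_start_line + (2 * (160 - 1 - c * 20 - 4) + b / 16)) = (data_start_line + (2 * (160 - 1 - c * 20 - 4) + b / 16)) from min_eq_right (by omega)]
  rw [show max (data_start_line + (2 * (160 - 1 - c * 20 - 0) + b / 16)) (data_start_line + (2 * (160 - 1 - c * 20 - 4) + b / 16)) = (data_start_line + (2 * (160 - 1 - c * 20 - 0) + b / 16)) from max_eq_left (by omega)]
  rw [show min (data_start_line + (2 * (160 - 1 - c * 20 - 4) + b / 16)) (data_start_line + (2 * (160 - 1 - c * 20 - 5) + b / 16)) = (data_start_line + (2 * (160 - 1 - c * 20 - 5) + b / 16)) from min_eq_right (by omega)]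
  rw [show max (data_start_line + (2 * (160 - 1 - c * 20 - 0) + b / 16)) (data_start_line + (2 * (160 - 1 - c * 20 - 5) + b / 16)) = (data_start_line + (2 * (160 - 1 - c * 20 - 0) + b / 16)) from max_eq_left (by omega)]
  rw [show min (data_start_line + (2 * (160 - 1 - c * 20 - 5) + b / 16)) (data_start_line + (2 * (160 - 1 - c * 20 - 6) + b / 16)) = (data_start_line + (2 * (160 - 1 - c * 20 - 6) + b / 16)) from min_eq_right (by omega)]
  rw [show max (data_start_line + (2 * (160 - 1 - c * 20 - 0) + b / 16)) (data_start_line + (2 * (160 - 1 - c * 20 - 6) + b / 16)) = (data_start_line + (2 * (160 - 1 - c * 20 - 0) + b / 16)) from max_eq_left (by omega)]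
  rw [show min (data_start_line + (2 * (160 - 1 - c * 20 - 6) + b / 16)) (data_start_line + (2 * (160 - 1 - c * 20 - 7) + b / 16)) = (data_start_line + (2 * (160 - 1 - c * 20 - 7) + b / 16)) from min_eq_right (by omega)]
  rw [show max (data_start_line + (2 * (160 - 1 - c * 20 - 0) + b / 16)) (data_start_line + (2 * (160 - 1 - c * 20 - 7) + b / 16)) = (data_start_line + (2 * (160 - 1 - c * 20 - 0) + b / 16)) from max_eq_left (by omega)]
  rw [show min (data_start_line + (2 * (160 - 1 - c * 20 - 7) + b / 16)) (data_start_line + (2 * (160 - 1 - c * 20 - 8) + b / 16)) = (data_start_line + (2 * (160 - 1 - c * 20 - 8) + b / 16)) from min_eq_right (by omega)]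
  rw [show max (data_start_line + (2 * (160 - 1 - c * 20 - 0) + b / 16)) (data_start_line + (2 * (160 - 1 - c * 20 - 8) + b / 16)) = (data_start_line + (2 * (160 - 1 - c * 20 - 0) + b / 16)) from max_eq_left (by omega)]
  rw [show min (data_start_line + (2 * (160 - 1 - c * 20 - 8) + b / 16)) (data_start_line + (2 * (160 - 1 - c * 20 - 9) + b / 16)) = (data_start_line + (2 * (160 - 1 - c * 20 - 9) + b / 16)) from min_eq_right (by omega)]
  rw [show max (data_start_line + (2 * (160 - 1 - c * 20 - 0) + b / 16)) (data_start_line + (2 * (160 - 1 - c * 20 - 9) + b / 16)) = (data_start_line + (2 * (160 - 1 - c * 20 - 0) + b / 16)) from max_eq_left (by omega)]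
  rw [show min (data_start_line + (2 * (160 - 1 - c * 20 - 9) + b / 16)) (data_start_line + (2 * (160 - 1 - c * 20 - 10) + b / 16)) = (data_start_line + (2 * (160 - 1 - c * 20 - 10) + b / 16)) from min_eq_right (by omega)]
  rw [show max (data_start_line + (2 * (160 - 1 - c * 20 - 0) + b / 16)) (data_start_line + (2 * (160 - 1 - c * 20 - 10) + b / 16)) = (data_start_line + (2 * (160 - 1 - c * 20 - 0) + b / 16)) from max_eq_left (by omega)]
  rw [show min (data_start_line + (2 * (160 - 1 - c * 20 - 10) + b / 16)) (data_start_line + (2 * (160 - 1 - c * 20 - 11) + b / 16)) = (data_start_line + (2 * (160 - 1 - c * 20 - 11) + b / 16)) from min_eq_right (by omega)]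
  rw [show max (data_start_line + (2 * (160 - 1 - c * 20 - 0) + b / 16)) (data_start_line + (2 * (160 - 1 - c * 20 - 11) + b / 16)) = (data_start_line + (2 * (160 - 1 - c * 20 - 0) + b / 16)) from max_eq_left (by omega)]
  rw [show min (data_start_line + (2 * (160 - 1 - c * 20 - 11) + b / 16)) (data_start_line + (2 * (160 - 1 - c * 20 - 12) + b / 16)) = (data_start_line + (2 * (160 - 1 - c * 20 - 12) + b / 16)) from min_eq_right (by omega)]
  rw [show max (data_start_line + (2 * (160 - 1 - c * 20 - 0) + b / 16)) (data_start_line + (2 * (160 - 1 - c * 20 - 12) + b / 16)) = (data_start_line + (2 * (160 - 1 - c * 20 - 0) + b / 16)) from max_eq_left (by omega)]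
  rw [show min (data_start_line + (2 * (160 - 1 - c * 20 - 12) + b / 16)) (data_start_line + (2 * (160 - 1 - c * 20 - 13) + b / 16)) = (data_start_line + (2 * (160 - 1 - c * 20 - 13) + b / 16)) from min_eq_right (by omega)]
  rw [show max (data_start_line + (2 * (160 - 1 - c * 20 - 0) + b / 16)) (data_start_line + (2 * (160 - 1 - c * 20 - 13) + b / 16)) = (data_start_line + (2 * (160 - 1 - c * 20 - 0) + b / 16)) from max_eq_left (by omega)]
  rw [show min (data_start_line + (2 * (160 - 1 - c * 20 - 13) + b / 16)) (data_start_line + (2 * (160 - 1 - c * 20 - 14) + b / 16)) = (data_start_line + (2 * (160 - 1 - c * 20 - 14) + b / 16)) from min_eq_right (by omega)]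
  rw [show max (data_start_line + (2 * (160 - 1 - c * 20 - 0) + b / 16)) (data_start_line + (2 * (160 - 1 - c * 20 - 14) + b / 16)) = (data_start_line + (2 * (160 - 1 - c * 20 - 0) + b / 16)) from max_eq_left (by omega)]
  rw [show min (data_start_line + (2 * (160 - 1 - c * 20 - 14) + b / 16)) (data_start_line + (2 * (160 - 1 - c * 20 - 15) + b / 16)) = (data_start_line + (2 * (160 - 1 - c * 20 - 15) + b / 16)) from min_eq_right (by omega)]
  rw [show max (data_start_line + (2 * (160 - 1 - c * 20 - 0) + b / 16)) (data_start_line + (2 * (160 - 1 - c * 20 - 15) + b / 16)) = (data_start_line + (2 * (160 - 1 - c * 20 - 0) + b / 16)) from max_eq_left (by omega)]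
  rw [show min (data_start_line + (2 * (160 - 1 - c * 20 - 15) + b / 16)) (data_start_line + (2 * (160 - 1 - c * 20 - 16) + b / 16)) = (data_start_line + (2 * (160 - 1 - c * 20 - 16) + b / 16)) from min_eq_right (by omega)]
  rw [show max (data_start_line + (2 * (160 - 1 - c * 20 - 0) + b / 16)) (data_start_line + (2 * (160 - 1 - c * 20 - 16) + b / 16)) = (data_start_line + (2 * (160 - 1 - c * 20 - 0) + b / 16)) from max_eq_left (by omega)]
  rw [show min (data_start_line + (2 * (160 - 1 - c * 20 - 16) + b / 16)) (data_start_line + (2 * (160 - 1 - c * 20 - 17) + b / 16)) = (data_start_line + (2 * (160 - 1 - c * 20 - 17) + b / 16)) from min_eq_right (by omega)]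
  rw [show max (data_start_line + (2 * (160 - 1 - c * 20 - 0) + b / 16)) (data_start_line + (2 * (160 - 1 - c * 20 - 17) + b / 16)) = (data_start_line + (2 * (160 - 1 - c * 20 - 0) + b / 16)) from max_eq_left (by omega)]
  rw [show min (data_start_line + (2 * (160 - 1 - c * 20 - 17) + b / 16)) (data_start_line + (2 * (160 - 1 - c * 20 - 18) + b / 16)) = (data_start_line + (2 * (160 - 1 - c * 20 - 18) + b / 16)) from min_eq_right (by omega)]
  rw [show max (data_start_line + (2 * (160 - 1 - c * 20 - 0) + b / 16)) (data_start_line + (2 * (160 - 1 - c * 20 - 18) + b / 16)) = (data_start_line + (2 * (160 - 1 - c * 20 - 0) + b / 16)) from max_eq_left (by omega)]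
  rw [show min (data_start_line + (2 * (160 - 1 - c * 20 - 18) + b / 16)) (data_start_line + (2 * (160 - 1 - c * 20 - 19) + b / 16)) = (data_start_line + (2 * (160 - 1 - c * 20 - 19) + b / 16)) from min_eq_right (by omega)]
  rw [show max (data_start_line + (2 * (160 - 1 - c * 20 - 0) + b / 16)) (data_start_line + (2 * (160 - 1 - c * 20 - 19) + b / 16)) = (data_start_line + (2 * (160 - 1 - c * 20 - 0) + b / 16)) from max_eq_left (by omega)]
  rw [min_eq_left (by omega), max_eq_right (by omega)]
  simp only [Prod.mk.injEq]
  omega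

-- ===== VERDICT (by name: the statement is the Claim_ definition above) =====
theorem slot_h_line_range_spec : Claim_equal_slot_h_line_range := by
  intro slot d _
  exact slot_h_line_range_eq slot d
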